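-- pv_equiv track=rewrite | github.com/AlexeiVartoumian/algorithmicProblems | HackerRank/array/stockMaximise.py | stockmax
-- ===== SOURCE A (Python) =====
-- def stockmax(prices):
--     # Write your code here
--     index = 0
--
--     maxprofit = 0
--     for i in range(len(prices)-1):
--
--         if i >= index:
--             maxprofitforday = 0
--             for j in range(i+1, len(prices)):
--                 if prices[j] - prices[i] >= maxprofitforday :
--                     maxprofitforday = prices[j] - prices[i]
--                     index = j
--         if i < index:
--             maxprofit += prices[index] - prices[i]
--     return maxprofit
-- ===== SOURCE B (Python) =====
-- def stockmax(prices):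
--     profit = 0
--     best = None
--     for p in reversed(prices):
--         if best is None or p > best:
--             best = p
--         profit += best - p
--     return profit
-- ===== Notes on version B (the rewrite author's own statement) =====
-- stated objective: faster
-- what changed: Replaced A's nested quadratic scan (for each day, rescan the whole future to find the best selling day and an index cursor) by a single right-to-left pass that keeps the running maximum of the suffix and adds (running max - price) each day.
import Mathlib
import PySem

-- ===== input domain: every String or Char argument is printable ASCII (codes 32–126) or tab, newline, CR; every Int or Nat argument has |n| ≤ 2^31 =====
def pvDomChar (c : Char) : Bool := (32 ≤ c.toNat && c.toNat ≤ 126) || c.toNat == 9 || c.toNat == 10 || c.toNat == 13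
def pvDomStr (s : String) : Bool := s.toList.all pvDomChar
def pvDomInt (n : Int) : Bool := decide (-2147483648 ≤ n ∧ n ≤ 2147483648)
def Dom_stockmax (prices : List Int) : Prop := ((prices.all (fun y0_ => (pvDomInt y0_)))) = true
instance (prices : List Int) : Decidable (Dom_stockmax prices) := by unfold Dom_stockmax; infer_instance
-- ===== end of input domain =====

-- B replaces A's nested quadratic future-rescan by one right-to-left pass adding (suffix max - price); objective: faster (asymptotic).


-- ===== PORT A =====
-- indices i, j below always lie in [0, prices.length), so pyGetD with default 0 is exact for prices[i], prices[j]
def pvInnerStep (prices : List Int) (i : Int) (st2 : Int × Int) (j : Int) : Int × Int :=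
  if PySem.List.pyGetD prices j 0 - PySem.List.pyGetD prices i 0 ≥ st2.2 then
    (j, PySem.List.pyGetD prices j 0 - PySem.List.pyGetD prices i 0)
  else st2

def pvOuterStep (prices : List Int) (st : Int × Int) (i : Int) : Int × Int :=
  let index :=
    if i ≥ st.1 then
      ((PySem.List.pyRange (i + 1) (prices.length : Int) 1).foldl (pvInnerStep prices i) (st.1, 0)).1
    else st.1
  if i < index then
    (index, st.2 + (PySem.List.pyGetD prices index 0 - PySem.List.pyGetD prices i 0))
  else (index, st.2)

def stockmax (prices : List Int) : Int :=
  ((PySem.List.pyRange 0 ((prices.length : Int) - 1) 1).foldl (pvOuterStep prices) (0, 0)).2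

-- ===== PORT B =====
def pvAltStep (st : Int × Option Int) (p : Int) : Int × Option Int :=
  let best : Int :=
    match st.2 with
    | none => p
    | some b => if p > b then p else b
  (st.1 + (best - p), some best)

def stockmax_alt (prices : List Int) : Int :=
  (prices.reverse.foldl pvAltStep (0, none)).1

-- ===== PRECONDITION & SPEC =====
def Spec_stockmax (prices : List Int) (out : Int) : Prop := out = stockmax_alt prices
instance (prices : List Int) (out : Int) : Decidable (Spec_stockmax prices out) := by unfold Spec_stockmax; infer_instance

-- ===== CLAIM (what is proved, stated in full; the proofs are below) =====
def Claim_equal_stockmax : Prop := ∀ (prices : List Int), Dom_stockmax prices → Spec_stockmax prices (stockmax prices)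

-- ===== LEMMAS AND PROOFS =====

-- maximum of a non-empty list (0 on [] is never used)
def pvMaxOf : List Int → Int
  | [] => 0
  | [p] => p
  | p :: q :: r => max p (pvMaxOf (q :: r))

def pvG (prices : List Int) (j : Int) : Int := PySem.List.pyGetD prices j 0
def pvM (prices : List Int) (t : Int) : Int := pvMaxOf (prices.drop t.toNat)
def pvS (prices : List Int) (i : Int) : Int :=
  ((PySem.List.pyRange i ((prices.length : Int) - 1) 1).map (fun t => pvM prices t - pvG prices t)).sum

lemma pvMaxOf_cons (p : Int) (l : List Int) (h : l ≠ []) :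
    pvMaxOf (p :: l) = max p (pvMaxOf l) := by
  cases l with
  | nil => simp at h
  | cons q r => rfl

lemma le_pvMaxOf (x : Int) (l : List Int) (hx : x ∈ l) : x ≤ pvMaxOf l := by
  induction l with
  | nil => simp at hx
  | cons p r ih =>
    cases r with
    | nil => simp at hx; simp [pvMaxOf, hx]
    | cons q s =>
      rw [pvMaxOf_cons p (q :: s) (by simp)]
      rcases List.mem_cons.mp hx with h | h
      · exact h ▸ le_max_left _ _
      · exact le_trans (ih h) (le_max_right _ _)

lemma pvMaxOf_mem (l : List Int) (h : l ≠ []) : pvMaxOf l ∈ l := by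
  induction l with
  | nil => simp at h
  | cons p r ih =>
    cases r with
    | nil => simp [pvMaxOf]
    | cons q s =>
      rw [pvMaxOf_cons p (q :: s) (by simp)]
      rcases le_total p (pvMaxOf (q :: s)) with hle | hle
      · rw [max_eq_right hle]; exact List.mem_cons_of_mem _ (ih (by simp))
      · rw [max_eq_left hle]; exact List.mem_cons_self

lemma pvG_natCast (prices : List Int) (k : Nat) (hk : k < prices.length) :
    pvG prices (k : Int) = prices[k] := by
  simp [pvG, List.getD_eq_getElem?_getD, List.getElem?_eq_getElem hk]

lemma mem_drop_iff_pvG (prices : List Int) (i : Int) (h0 : 0 ≤ i) (x : Int) :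
    x ∈ prices.drop i.toNat ↔
      ∃ j : Int, i ≤ j ∧ j < (prices.length : Int) ∧ pvG prices j = x := by
  constructor
  · intro hx
    rcases List.mem_iff_getElem.mp hx with ⟨m, hm, hval⟩
    have hlen := List.length_drop (l := prices) (i := i.toNat)
    refine ⟨i + m, by omega, by omega, ?_⟩
    have hlt : i.toNat + m < prices.length := by omega
    have hg : pvG prices (i + m) = prices[i.toNat + m] := by
      have h2 := pvG_natCast prices (i.toNat + m) hlt
      rw [← h2]; congr 1; omega
    rw [hg, ← List.getElem_drop]; exact hval
  · rintro ⟨j, hij, hjn, rfl⟩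
    have hj0 : 0 ≤ j := le_trans h0 hij
    have hlt : j.toNat < prices.length := by omega
    have hg : pvG prices j = prices[j.toNat] := by
      have h2 := pvG_natCast prices j.toNat hlt
      rw [← h2]; congr 1; omega
    rw [hg, List.mem_iff_getElem]
    refine ⟨j.toNat - i.toNat, by simp [List.length_drop]; omega, ?_⟩
    rw [List.getElem_drop]
    congr 1; omega

lemma pvM_eq (prices : List Int) (i idx : Int) (h0 : 0 ≤ i) (h1 : i ≤ idx)
    (h2 : idx < (prices.length : Int))
    (hb : ∀ j, i ≤ j → j < (prices.length : Int) → pvG prices j ≤ pvG prices idx) :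
    pvM prices i = pvG prices idx := by
  have hne : prices.drop i.toNat ≠ [] := by
    intro h
    have hl := List.length_drop (l := prices) (i := i.toNat)
    rw [h] at hl; simp at hl; omega
  unfold pvM
  apply le_antisymm
  · have hmem := pvMaxOf_mem _ hne
    rcases (mem_drop_iff_pvG prices i h0 _).mp hmem with ⟨j, hij, hjn, hval⟩
    rw [← hval]; exact hb j hij hjn
  · exact le_pvMaxOf _ _ ((mem_drop_iff_pvG prices i h0 _).mpr ⟨idx, h1, h2, rfl⟩)

lemma pvS_nil (prices : List Int) (i : Int) (h : (prices.length : Int) - 1 ≤ i) :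
    pvS prices i = 0 := by
  unfold pvS
  rw [PySem.List.pyRange_one_eq_nil h]; simp

lemma pvS_cons (prices : List Int) (i : Int) (h : i < (prices.length : Int) - 1) :
    pvS prices i = (pvM prices i - pvG prices i) + pvS prices (i + 1) := by
  unfold pvS
  rw [PySem.List.pyRange_one_cons h]; simp

-- inner loop: result bounds all future diffs; either left unchanged (all diffs below st.2) or points at its own value
lemma pv_inner_spec (prices : List Int) (i : Int) :
    ∀ k : Nat, ∀ a : Int, ((prices.length : Int) - a).toNat ≤ k → i < a → ∀ st : Int × Int,
    ((((PySem.List.pyRange a (prices.length : Int) 1).foldl (pvInnerStep prices i) st) = st ∧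
        ∀ j, a ≤ j → j < (prices.length : Int) → pvG prices j - pvG prices i < st.2)
      ∨ (a ≤ ((PySem.List.pyRange a (prices.length : Int) 1).foldl (pvInnerStep prices i) st).1 ∧
         ((PySem.List.pyRange a (prices.length : Int) 1).foldl (pvInnerStep prices i) st).1 < (prices.length : Int) ∧
         pvG prices ((PySem.List.pyRange a (prices.length : Int) 1).foldl (pvInnerStep prices i) st).1 - pvG prices i =
           ((PySem.List.pyRange a (prices.length : Int) 1).foldl (pvInnerStep prices i) st).2))
    ∧ st.2 ≤ ((PySem.List.pyRange a (prices.length : Int) 1).foldl (pvInnerStep prices i) st).2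
    ∧ ∀ j, a ≤ j → j < (prices.length : Int) →
        pvG prices j - pvG prices i ≤ ((PySem.List.pyRange a (prices.length : Int) 1).foldl (pvInnerStep prices i) st).2 := by
  intro k
  induction k with
  | zero =>
    intro a ha hia st
    have hna : (prices.length : Int) ≤ a := by omega
    rw [PySem.List.pyRange_one_eq_nil hna]
    exact ⟨Or.inl ⟨rfl, fun j hj1 hj2 => by omega⟩, le_rfl, fun j hj1 hj2 => by omega⟩
  | succ k ih =>
    intro a ha hia st
    by_cases hna : (prices.length : Int) ≤ a
    · rw [PySem.List.pyRange_one_eq_nil hna]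
      exact ⟨Or.inl ⟨rfl, fun j hj1 hj2 => by omega⟩, le_rfl, fun j hj1 hj2 => by omega⟩
    · rw [PySem.List.pyRange_one_cons (by omega : a < (prices.length : Int)), List.foldl_cons]
      obtain ⟨Hd, Hle, Hbd⟩ := ih (a + 1) (by omega) (by omega) (pvInnerStep prices i st a)
      by_cases hc : pvG prices a - pvG prices i ≥ st.2
      · have h1a : (pvInnerStep prices i st a).1 = a := by
          unfold pvInnerStep
          rw [if_pos (show PySem.List.pyGetD prices a 0 - PySem.List.pyGetD prices i 0 ≥ st.2 from hc)]
        have h2a : (pvInnerStep prices i st a).2 = pvG prices a - pvG prices i := by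
          unfold pvInnerStep
          rw [if_pos (show PySem.List.pyGetD prices a 0 - PySem.List.pyGetD prices i 0 ≥ st.2 from hc)]
          rfl
        refine ⟨?_, by omega, ?_⟩
        · rcases Hd with ⟨Heq, _⟩ | ⟨hb1, hb2, hb3⟩
          · right
            rw [Heq, h1a, h2a]
            exact ⟨le_rfl, by omega, rfl⟩
          · exact Or.inr ⟨by omega, hb2, hb3⟩
        · intro j hj1 hj2
          rcases eq_or_lt_of_le hj1 with heq | hlt
          · subst heq
            omega
          · exact Hbd j (by omega) hj2
      · have hsteq : pvInnerStep prices i st a = st := by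
          unfold pvInnerStep
          rw [if_neg (show ¬ PySem.List.pyGetD prices a 0 - PySem.List.pyGetD prices i 0 ≥ st.2 from hc)]
        have h2a : (pvInnerStep prices i st a).2 = st.2 := by rw [hsteq]
        refine ⟨?_, by omega, ?_⟩
        · rcases Hd with ⟨Heq, Hlt⟩ | ⟨hb1, hb2, hb3⟩
          · left
            refine ⟨by rw [Heq, hsteq], fun j hj1 hj2 => ?_⟩
            rcases eq_or_lt_of_le hj1 with heq | hlt
            · subst heq
              omega
            · have := Hlt j (by omega) hj2
              omega
          · exact Or.inr ⟨by omega, hb2, hb3⟩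
        · intro j hj1 hj2
          rcases eq_or_lt_of_le hj1 with heq | hlt
          · subst heq
            omega
          · exact Hbd j (by omega) hj2

-- outer loop invariant: accumulated profit plus the remaining per-day (suffix max - price) sum
lemma pv_outer_spec (prices : List Int) :
    ∀ k : Nat, ∀ i : Int, ∀ st : Int × Int, 0 ≤ i → ((prices.length : Int) - 1 - i).toNat ≤ k →
    (st.1 ≤ i ∨ (i < st.1 ∧ st.1 < (prices.length : Int) ∧
        ∀ j, i ≤ j → j < (prices.length : Int) → pvG prices j ≤ pvG prices st.1)) →
    ((PySem.List.pyRange i ((prices.length : Int) - 1) 1).foldl (pvOuterStep prices) st).2 =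
      st.2 + pvS prices i := by
  intro k
  induction k with
  | zero =>
    intro i st h0 hf hInv
    have hend : (prices.length : Int) - 1 ≤ i := by omega
    rw [PySem.List.pyRange_one_eq_nil hend, List.foldl_nil, pvS_nil prices i hend]
    omega
  | succ k ih =>
    intro i st h0 hf hInv
    by_cases hend : (prices.length : Int) - 1 ≤ i
    · rw [PySem.List.pyRange_one_eq_nil hend, List.foldl_nil, pvS_nil prices i hend]
      omega
    · have hend' : i < (prices.length : Int) - 1 := by omega
      have hin : i < (prices.length : Int) := by omega
      rw [PySem.List.pyRange_one_cons hend', List.foldl_cons, pvS_cons prices i hend']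
      by_cases hge : i ≥ st.1
      · obtain ⟨Hd, Hle, Hbd⟩ := pv_inner_spec prices i ((prices.length : Int) - (i + 1)).toNat (i + 1) le_rfl (by omega) (st.1, 0)
        set r := (PySem.List.pyRange (i + 1) (prices.length : Int) 1).foldl (pvInnerStep prices i) (st.1, 0) with hr
        have hle0 : (0 : Int) ≤ r.2 := Hle
        have Hbd' : ∀ j, i + 1 ≤ j → j < (prices.length : Int) → pvG prices j - pvG prices i ≤ r.2 := Hbd
        have hstep : pvOuterStep prices st i =
            if i < r.1 then (r.1, st.2 + (pvG prices r.1 - pvG prices i)) else (r.1, st.2) := by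
          simp only [pvOuterStep]
          rw [if_pos hge, ← hr]
          rfl
        rcases Hd with ⟨Heq, Hlt⟩ | ⟨ha1, ha2, ha3⟩
        · have hr1 : r.1 = st.1 := by rw [Heq]
          have Hlt' : ∀ j, i + 1 ≤ j → j < (prices.length : Int) → pvG prices j - pvG prices i < 0 := Hlt
          rw [hstep, if_neg (show ¬ i < r.1 by omega)]
          rw [ih (i + 1) (r.1, st.2) (by omega) (by omega) (Or.inl (by omega))]
          have hM : pvM prices i = pvG prices i := by
            apply pvM_eq prices i i h0 le_rfl hin
            intro j hj1 hj2
            rcases eq_or_lt_of_le hj1 with heq | hlt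
            · subst heq
              exact le_rfl
            · have := Hlt' j (by omega) hj2
              omega
          have hproj : ((r.1, st.2) : Int × Int).2 = st.2 := rfl
          omega
        · have hbound : ∀ j, i ≤ j → j < (prices.length : Int) → pvG prices j ≤ pvG prices r.1 := by
            intro j hj1 hj2
            rcases eq_or_lt_of_le hj1 with heq | hlt
            · subst heq
              omega
            · have := Hbd' j (by omega) hj2
              omega
          have hInv' : r.1 ≤ i + 1 ∨ (i + 1 < r.1 ∧ r.1 < (prices.length : Int) ∧
              ∀ j, i + 1 ≤ j → j < (prices.length : Int) → pvG prices j ≤ pvG prices r.1) := by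
            rcases eq_or_lt_of_le ha1 with h | h
            · exact Or.inl (by omega)
            · exact Or.inr ⟨h, ha2, fun j hj1 hj2 => hbound j (by omega) hj2⟩
          rw [hstep, if_pos (show i < r.1 by omega)]
          rw [ih (i + 1) (r.1, st.2 + (pvG prices r.1 - pvG prices i)) (by omega) (by omega) hInv']
          have hM : pvM prices i = pvG prices r.1 := pvM_eq prices i r.1 h0 (by omega) ha2 hbound
          have hproj : ((r.1, st.2 + (pvG prices r.1 - pvG prices i)) : Int × Int).2 =
              st.2 + (pvG prices r.1 - pvG prices i) := rfl
          omega
      · rcases hInv with h | ⟨h1, h2, h3⟩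
        · omega
        · have hstep : pvOuterStep prices st i = (st.1, st.2 + (pvG prices st.1 - pvG prices i)) := by
            simp only [pvOuterStep]
            rw [if_neg (show ¬ i ≥ st.1 by omega), if_pos (show i < st.1 from h1)]
            rfl
          have hInv' : st.1 ≤ i + 1 ∨ (i + 1 < st.1 ∧ st.1 < (prices.length : Int) ∧
              ∀ j, i + 1 ≤ j → j < (prices.length : Int) → pvG prices j ≤ pvG prices st.1) := by
            rcases eq_or_lt_of_le (show i + 1 ≤ st.1 by omega) with h | h
            · exact Or.inl (by omega)
            · exact Or.inr ⟨h, h2, fun j hj1 hj2 => h3 j (by omega) hj2⟩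
          rw [hstep]
          rw [ih (i + 1) (st.1, st.2 + (pvG prices st.1 - pvG prices i)) (by omega) (by omega) hInv']
          have hM : pvM prices i = pvG prices st.1 := pvM_eq prices i st.1 h0 (le_of_lt h1) h2 h3
          have hproj : ((st.1, st.2 + (pvG prices st.1 - pvG prices i)) : Int × Int).2 =
              st.2 + (pvG prices st.1 - pvG prices i) := rfl
          omega

def pvBestB : List Int → Option Int
  | [] => none
  | p :: ps => some (pvMaxOf (p :: ps))

def pvSpecB : List Int → Int
  | [] => 0
  | p :: ps => (pvMaxOf (p :: ps) - p) + pvSpecB ps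

lemma pv_alt_rev (prices : List Int) :
    prices.reverse.foldl pvAltStep (0, none) = (pvSpecB prices, pvBestB prices) := by
  induction prices with
  | nil => rfl
  | cons p ps ih =>
    rw [List.reverse_cons, List.foldl_append, ih]
    cases ps with
    | nil => simp [pvAltStep, pvSpecB, pvBestB, pvMaxOf]
    | cons q r =>
      simp only [pvAltStep, pvBestB, List.foldl, Prod.mk.injEq]
      have hmax : (if p > pvMaxOf (q :: r) then p else pvMaxOf (q :: r)) = max p (pvMaxOf (q :: r)) := by
        split_ifs <;> omega
      rw [hmax, pvMaxOf_cons p (q :: r) (by simp)]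
      constructor
      · simp only [pvSpecB]
        rw [pvMaxOf_cons p (q :: r) (by simp)]
        omega
      · rfl

lemma pv_specB_drop (prices : List Int) :
    ∀ m : Nat, ∀ k : Nat, prices.length - k ≤ m →
      pvSpecB (prices.drop k) = pvS prices (k : Int) := by
  intro m
  induction m with
  | zero =>
    intro k hk
    rw [List.drop_of_length_le (by omega), pvS_nil prices _ (by omega)]
    rfl
  | succ m ih =>
    intro k hk
    by_cases hkn : prices.length ≤ k
    · rw [List.drop_of_length_le hkn, pvS_nil prices _ (by omega)]
      rfl
    · have hkn' : k < prices.length := by omega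
      have hdrop : prices.drop k = prices[k] :: prices.drop (k + 1) := List.drop_eq_getElem_cons hkn'
      have h1 : pvM prices (k : Int) = pvMaxOf (prices.drop k) := by
        simp [pvM]
      have h2 : pvG prices (k : Int) = prices[k] := pvG_natCast prices k hkn'
      by_cases hlast : k + 1 = prices.length
      · have hnil : prices.drop (k + 1) = [] := List.drop_of_length_le (by omega)
        rw [hdrop, hnil, pvS_nil prices _ (by omega)]
        simp [pvSpecB, pvMaxOf]
      · have hrec := ih (k + 1) (by omega)
        rw [pvS_cons prices _ (by omega)]
        rw [hdrop]
        simp only [pvSpecB]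
        rw [← hdrop, h1, h2]
        have h3 : ((k : Int) + 1) = ((k + 1 : Nat) : Int) := by push_cast; ring
        rw [h3, ← hrec]

-- ===== VERDICT (by name: the statement is the Claim_ definition above) =====
theorem stockmax_spec : Claim_equal_stockmax := by
  intro prices _
  unfold Spec_stockmax
  have hA : stockmax prices = 0 + pvS prices 0 := by
    unfold stockmax
    exact pv_outer_spec prices ((prices.length : Int) - 1 - 0).toNat 0 (0, 0) le_rfl le_rfl (Or.inl le_rfl)
  have hB : stockmax_alt prices = pvS prices 0 := by
    unfold stockmax_alt
    rw [pv_alt_rev]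
    have := pv_specB_drop prices prices.length 0 (by omega)
    simpa using this
  rw [hA, hB]
  omega
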